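-- pv_equiv track=rewrite | github.com/BigDataRepublic/graph-coloring-challange | gcp.py | objective_color_class_square_sum
-- ===== SOURCE A (Python) =====
-- def objective_color_class_square_sum(solution):
--     """
--     Calculates the negative sum of the squares of the sizes of color classes in the solution.
--     This objective function is used to encourage a more balanced distribution of colors
--     across vertices in the graph coloring problem.
--
--     Each color class is defined by the vertices colored with the same color. The size of
--     a color class is the number of vertices with that color. This function squares the size
--     of each color class and sums these values across all classes. The negative of this sum
--     is returned as the objective value.
--
--     Args:
--         solution (list): The coloring solution, where each element in the list represents
--                          the color of the corresponding vertex in the graph.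
--
--     Returns:
--         int: The negative sum of the squares of the sizes of the color classes. A lower
--              value (more negative) indicates a more balanced color distribution.
--     """
--     color_class_sizes = {}
--
--     # Count the number of vertices for each color
--     for color in solution:
--         if color in color_class_sizes:
--             color_class_sizes[color] += 1
--         else:
--             color_class_sizes[color] = 1
--
--     # Sum the squares of the color class sizes
--     sum_of_squares = sum(size ** 2 for size in color_class_sizes.values())
--     return -1 * sum_of_squares
-- ===== SOURCE B (Python) =====
-- def objective_color_class_square_sum(solution):
--     # Sort-then-scan: equal colors become contiguous runs; sum squared run lengths.
--     s = sorted(solution)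
--     if not s:
--         return 0
--     total = 0
--     cur = s[0]
--     run = 1
--     for x in s[1:]:
--         if x == cur:
--             run += 1
--         else:
--             total += run * run
--             cur = x
--             run = 1
--     total += run * run
--     return -total
-- ===== Notes on version B (the rewrite author's own statement) =====
-- stated objective: alternative
-- what changed: Replaces the hash-map color counter plus sum-of-squared-values with a sort-then-scan over contiguous runs of equal colors, squaring each run length in a single pass.
import Mathlib
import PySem

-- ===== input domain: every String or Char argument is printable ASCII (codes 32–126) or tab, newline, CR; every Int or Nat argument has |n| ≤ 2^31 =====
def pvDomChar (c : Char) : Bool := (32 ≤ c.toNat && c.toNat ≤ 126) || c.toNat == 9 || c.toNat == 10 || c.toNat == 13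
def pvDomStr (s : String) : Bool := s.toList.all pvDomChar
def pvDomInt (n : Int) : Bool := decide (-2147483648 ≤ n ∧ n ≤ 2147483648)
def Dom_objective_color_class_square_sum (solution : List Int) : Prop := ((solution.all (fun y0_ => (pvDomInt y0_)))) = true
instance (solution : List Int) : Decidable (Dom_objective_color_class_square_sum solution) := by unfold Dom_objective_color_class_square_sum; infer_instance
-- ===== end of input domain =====

-- B replaces A's hash-map color counter with a sort-then-scan over runs of equal colors (alternative algorithm, same result).


-- ===== PORT A =====
def objective_color_class_square_sum (solution : List Int) : Int :=
  let color_class_sizes : PySem.Dict Int Int :=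
    solution.foldl
      (fun d color =>
        if d.contains color then d.insert color (d.getD color 0 + 1)
        else d.insert color 1)
      PySem.Dict.empty
  let sum_of_squares := ((PySem.Dict.values color_class_sizes).map (fun size => size ^ 2)).sum;
  -1 * sum_of_squares

-- ===== PORT B =====
-- loop state: (total, cur, run)
def pvBStep (st : Int × Int × Int) (x : Int) : Int × Int × Int :=
  if x = st.2.1 then (st.1, st.2.1, st.2.2 + 1)
  else (st.1 + st.2.2 * st.2.2, x, 1)

def objective_color_class_square_sum_alt (solution : List Int) : Int :=
  let s := PySem.List.sorted solution (fun x => x) false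
  match s with
  | [] => 0
  | c :: rest =>
    let st := rest.foldl pvBStep (0, c, 1);
    -(st.1 + st.2.2 * st.2.2)

-- ===== PRECONDITION & SPEC =====
def Spec_objective_color_class_square_sum (solution : List Int) (out : Int) : Prop := out = objective_color_class_square_sum_alt solution
instance (solution : List Int) (out : Int) : Decidable (Spec_objective_color_class_square_sum solution out) := by unfold Spec_objective_color_class_square_sum; infer_instance

-- ===== CLAIM (what is proved, stated in full; the proofs are below) =====
def Claim_equal_objective_color_class_square_sum : Prop := ∀ (solution : List Int), Dom_objective_color_class_square_sum solution → Spec_objective_color_class_square_sum solution (objective_color_class_square_sum solution)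

-- ===== LEMMAS AND PROOFS =====

-- the common value: sum over the distinct colors of xs of the squared multiplicity
def pvSq (xs : List Int) : Int :=
  ((PySem.Set.ofList xs).map (fun k => ((xs.count k : Int)) ^ 2)).sum

-- B's "finish the scan" value, started with current color cur and run length run
def pvF (cur run : Int) (l : List Int) : Int :=
  let st := l.foldl pvBStep (0, cur, run)
  st.1 + st.2.2 * st.2.2

lemma pvBStep_offset (l : List Int) : ∀ (t cur run : Int),
    l.foldl pvBStep (t, cur, run) =
      (t + (l.foldl pvBStep (0, cur, run)).1, (l.foldl pvBStep (0, cur, run)).2) := by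
  induction l with
  | nil => intro t cur run; simp
  | cons x l ih =>
    intro t cur run
    by_cases h : x = cur
    · have e1 : pvBStep (t, cur, run) x = (t, cur, run + 1) := by simp [pvBStep, h]
      have e2 : pvBStep (0, cur, run) x = (0, cur, run + 1) := by simp [pvBStep, h]
      simp only [List.foldl_cons, e1, e2]
      exact ih t cur (run + 1)
    · have e1 : pvBStep (t, cur, run) x = (t + run * run, x, 1) := by simp [pvBStep, h]
      have e2 : pvBStep (0, cur, run) x = (0 + run * run, x, 1) := by simp [pvBStep, h]
      simp only [List.foldl_cons, e1, e2]
      rw [ih (t + run * run), ih (0 + run * run)]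
      simp; ring

lemma pvF_cons (x cur run : Int) (l : List Int) :
    pvF cur run (x :: l) = if x = cur then pvF cur (run + 1) l else run * run + pvF x 1 l := by
  by_cases h : x = cur
  · simp [pvF, List.foldl_cons, pvBStep, h]
  · simp only [pvF, List.foldl_cons, pvBStep, if_neg h]
    rw [pvBStep_offset l (0 + run * run) x 1]
    simp; ring

lemma pvG (l : List Int) : ∀ (cur run : Int),
    List.Pairwise (· ≤ ·) l → (∀ x ∈ l, cur ≤ x) →
    pvF cur run l = (run + (l.count cur : Int)) ^ 2 +
      ((PySem.Set.discard (PySem.Set.ofList l) cur).map (fun k => ((l.count k : Int)) ^ 2)).sum := by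
  induction l with
  | nil => intro cur run _ _; simp [pvF, PySem.Set.discard]; ring
  | cons x l ih =>
    intro cur run hp hle
    have hpl : List.Pairwise (· ≤ ·) l := hp.of_cons
    have hxle : ∀ y ∈ l, x ≤ y := fun y hy => List.rel_of_pairwise_cons hp hy
    rw [pvF_cons]
    by_cases h : x = cur
    · subst h
      rw [if_pos rfl, ih x (run + 1) hpl hxle]
      have hd : PySem.Set.discard (PySem.Set.ofList (x :: l)) x
          = PySem.Set.discard (PySem.Set.ofList l) x := by
        rw [PySem.Set.ofList_cons]
        simp [PySem.Set.discard, List.filter_filter]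
      rw [hd]
      have hmap : ((PySem.Set.discard (PySem.Set.ofList l) x).map (fun k => (((x :: l).count k : Int)) ^ 2))
          = ((PySem.Set.discard (PySem.Set.ofList l) x).map (fun k => ((l.count k : Int)) ^ 2)) := by
        apply List.map_congr_left
        intro k hk
        have hkne : k ≠ x := ((PySem.Set.mem_discard _ _ _).1 hk).2
        simp [Ne.symm hkne]
      rw [hmap]
      have : (((x :: l).count x : Int)) = (l.count x : Int) + 1 := by
        simp
      rw [this]; ring
    · rw [if_neg h]
      have hcx : cur < x := lt_of_le_of_ne (hle x List.mem_cons_self) (fun e => h e.symm)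
      have hcur_not : ∀ y ∈ (x :: l), y ≠ cur := by
        intro y hy e
        rcases List.mem_cons.1 hy with e' | e'
        · exact h (e' ▸ e)
        · exact absurd (hxle y e') (by omega)
      have hcount0 : ((x :: l).count cur : Int) = 0 := by
        have : (x :: l).count cur = 0 := List.count_eq_zero.2 (fun hmem => hcur_not cur hmem rfl)
        simp [this]
      have hd : PySem.Set.discard (PySem.Set.ofList (x :: l)) cur = PySem.Set.ofList (x :: l) := by
        simp only [PySem.Set.discard]
        apply List.filter_eq_self.2
        intro y hy
        have : y ≠ cur := hcur_not y ((PySem.Set.mem_ofList _ _).1 hy)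
        simp [this]
      rw [ih x 1 hpl hxle, hcount0, hd, PySem.Set.ofList_cons]
      simp only [List.map_cons, List.sum_cons]
      have hmap : (((PySem.Set.ofList l).discard x).map (fun k => (((x :: l).count k : Int)) ^ 2))
          = (((PySem.Set.ofList l).discard x).map (fun k => ((l.count k : Int)) ^ 2)) := by
        apply List.map_congr_left
        intro k hk
        have hkne : k ≠ x := ((PySem.Set.mem_discard _ _ _).1 hk).2
        simp [Ne.symm hkne]
      have hcx2 : (((x :: l).count x : Int)) = (l.count x : Int) + 1 := by
        simp
      rw [hmap, hcx2]; ring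

-- B computes -pvSq of the sorted list's multiset
lemma pvB_eq (solution : List Int) :
    objective_color_class_square_sum_alt solution = -pvSq solution := by
  unfold objective_color_class_square_sum_alt
  have hperm : (PySem.List.sorted solution (fun x => x) false).Perm solution :=
    PySem.List.sorted_perm solution (fun x => x) false
  have hpair : List.Pairwise (· ≤ ·) (PySem.List.sorted solution (fun x => x) false) :=
    PySem.List.sorted_pairwise solution (fun x => x)
  -- pvSq is invariant under permutation
  have hsq : pvSq (PySem.List.sorted solution (fun x => x) false) = pvSq solution := by
    set s := PySem.List.sorted solution (fun x => x) false with hs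
    have hsetperm : (PySem.Set.ofList s).Perm (PySem.Set.ofList solution) := by
      rw [List.perm_ext_iff_of_nodup (PySem.Set.nodup_ofList s) (PySem.Set.nodup_ofList solution)]
      intro a
      rw [PySem.Set.mem_ofList, PySem.Set.mem_ofList]
      exact hperm.mem_iff
    have hcnt : ∀ k, s.count k = solution.count k := fun k => hperm.count_eq k
    unfold pvSq
    calc ((PySem.Set.ofList s).map (fun k => ((s.count k : Int)) ^ 2)).sum
        = ((PySem.Set.ofList s).map (fun k => ((solution.count k : Int)) ^ 2)).sum := by
          congr 1; apply List.map_congr_left; intro k _; rw [hcnt k]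
      _ = ((PySem.Set.ofList solution).map (fun k => ((solution.count k : Int)) ^ 2)).sum :=
          (hsetperm.map _).sum_eq
  rw [← hsq]
  set s := PySem.List.sorted solution (fun x => x) false with hs
  clear_value s
  cases s with
  | nil => simp [pvSq]
  | cons c rest =>
    have hpl : List.Pairwise (· ≤ ·) rest := hpair.of_cons
    have hcle : ∀ y ∈ rest, c ≤ y := fun y hy => List.rel_of_pairwise_cons hpair hy
    have : pvF c 1 rest = pvSq (c :: rest) := by
      rw [pvG rest c 1 hpl hcle]
      unfold pvSq
      rw [PySem.Set.ofList_cons]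
      simp only [List.map_cons, List.sum_cons]
      have hmap : (((PySem.Set.ofList rest).discard c).map (fun k => (((c :: rest).count k : Int)) ^ 2))
          = (((PySem.Set.ofList rest).discard c).map (fun k => ((rest.count k : Int)) ^ 2)) := by
        apply List.map_congr_left
        intro k hk
        have hkne : k ≠ c := ((PySem.Set.mem_discard _ _ _).1 hk).2
        simp [Ne.symm hkne]
      have hcc : (((c :: rest).count c : Int)) = (rest.count c : Int) + 1 := by
        simp
      rw [hmap, hcc]; ring
    simp only [pvF] at this
    simp only []
    rw [← this]

-- A computes -pvSq as well
lemma pvA_eq (solution : List Int) :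
    objective_color_class_square_sum solution = -pvSq solution := by
  unfold objective_color_class_square_sum
  have hfun : (fun (d : PySem.Dict Int Int) color =>
        if d.contains color then d.insert color (d.getD color 0 + 1)
        else d.insert color 1)
      = (fun (d : PySem.Dict Int Int) x => d.insert x (d.getD x 0 + 1)) := by
    funext d x
    by_cases h : d.contains x
    · simp [h]
    · have h' : d.contains x = false := by simpa using h
      simp [h', PySem.Dict.getD_of_not_contains d 0 h']
  rw [hfun, PySem.Dict.foldl_insert_getD_add_one_eq_counter]
  show (-1 : Int) * ((List.map (fun size => size ^ 2) (PySem.Dict.counter solution).values).sum) = -pvSq solution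
  have hvals : (PySem.Dict.counter solution).values
      = (PySem.Set.ofList solution).map (fun k => ((solution.count k : Int))) := by
    rw [PySem.Dict.values_eq_map_keys _ (PySem.Dict.nodup_keys_counter solution) 0,
        PySem.Dict.keys_counter]
    apply List.map_congr_left
    intro k _
    exact PySem.Dict.getD_counter solution k
  rw [hvals, List.map_map]
  unfold pvSq
  have : ((fun size => size ^ 2) ∘ fun k => ((solution.count k : Int)))
      = (fun k => ((solution.count k : Int)) ^ 2) := rfl
  rw [this]; ring

-- ===== VERDICT (by name: the statement is the Claim_ definition above) =====
theorem objective_color_class_square_sum_spec : Claim_equal_objective_color_class_square_sum := by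
  intro solution _
  unfold Spec_objective_color_class_square_sum
  rw [pvA_eq, pvB_eq]
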